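-- pv_equiv track=rewrite | github.com/olivia-rippee/Python-for-Computational-Biology-and-Bioinformatics | Bioinformatics IV - Molecular Evolution/4 Peptide Sequencing.py | DecodeIdealSpectrum
-- ===== SOURCE A (Python) =====
-- def ConstructSpectrumGraph(spectrum):
--     spectrum = sorted([0] + spectrum)
--     graph = {}  # dict: node -> list of (neighbor, aa)
--
--     for i in range(len(spectrum)):
--         for j in range(i + 1, len(spectrum)):
--             diff = spectrum[j] - spectrum[i]
--             if diff in massTable:
--                 aa = massTable[diff]
--                 u = spectrum[i]
--                 v = spectrum[j]
--                 if u not in graph: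
--                     graph[u] = []
--                 graph[u].append((v, aa))
--     return graph
--
-- def DFS(graph, current, target, path, peptide, allPaths):
--     if current == target:
--         allPaths.append(''.join(peptide))
--         return
--     if current not in graph:
--         return
--     for neighbor, aa in graph[current]:
--         DFS(graph, neighbor, target, path + [neighbor], peptide + [aa], allPaths)
--
-- def DecodeIdealSpectrum(spectrum):
--     '''
--     Input: A space-delimited list of integers Spectrum.
--     Output: An amino acid string that explains Spectrum.'''
--
--     start = 0
--     end = max(spectrum)
--     graph = ConstructSpectrumGraph(spectrum)
--     allPaths = []
--     DFS(graph, start, end, [], [], allPaths)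
--     for peptide in allPaths:
--         return peptide
--
-- massTable = {57:"G", 71:"A", 87:"S", 97:"P", 99:"V", 101:"T", 103:"C",
--              113:"L", 114:"N", 115:"D", 128:"Q", 129:"E", 131:"M",
--              137:"H", 147:"F", 156:"R", 163:"Y", 186:"W"}
-- ===== SOURCE B (Python) =====
-- def DecodeIdealSpectrum(spectrum):
--     '''
--     Input: A space-delimited list of integers Spectrum.
--     Output: An amino acid string that explains Spectrum.'''
--     end = max(spectrum)
--     nodes = set(spectrum)
--     nodes.add(0)
--
--     def dfs(current):
--         if current == end:
--             return ""
--         for mass, aa in massTable.items():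
--             nxt = current + mass
--             if nxt in nodes:
--                 rest = dfs(nxt)
--                 if rest is not None:
--                     return aa + rest
--         return None
--
--     return dfs(0)
--
-- massTable = {57:"G", 71:"A", 87:"S", 97:"P", 99:"V", 101:"T", 103:"C",
--              113:"L", 114:"N", 115:"D", 128:"Q", 129:"E", 131:"M",
--              137:"H", 147:"F", 156:"R", 163:"Y", 186:"W"}
-- ===== Notes on version B (the rewrite author's own statement) =====
-- stated objective: faster
-- what changed: A builds the full edge dict with an O(n^2) all-pairs pass over the sorted spectrum and then enumerates ALL source-to-sink paths by DFS, returning the first; B keeps only a hash set of nodes, generates each node's at most 18 successors directly from the mass table, and does a first-hit DFS that returns as soon as one path reaches the sink.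
import Mathlib
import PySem

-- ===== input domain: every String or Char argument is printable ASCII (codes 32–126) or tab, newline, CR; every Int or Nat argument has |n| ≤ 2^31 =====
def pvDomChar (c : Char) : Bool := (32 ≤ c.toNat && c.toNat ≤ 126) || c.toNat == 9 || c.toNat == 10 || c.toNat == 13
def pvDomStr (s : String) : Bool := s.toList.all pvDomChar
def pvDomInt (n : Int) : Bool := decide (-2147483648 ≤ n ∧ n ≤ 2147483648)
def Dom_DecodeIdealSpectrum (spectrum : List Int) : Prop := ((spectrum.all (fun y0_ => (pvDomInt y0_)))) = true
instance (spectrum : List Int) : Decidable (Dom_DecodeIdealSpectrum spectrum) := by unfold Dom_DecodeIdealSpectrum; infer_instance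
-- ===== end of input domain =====

-- B replaces A's O(n^2) all-pairs edge construction and exhaustive all-paths DFS by
-- set-membership edge generation (18 candidate masses per node) and a first-hit DFS
-- with early exit; equivalence of the returned value is proved below.

-- ===== PORT A =====
def pvMassTable : PySem.Dict Int String :=
  PySem.Dict.ofList [(57,"G"),(71,"A"),(87,"S"),(97,"P"),(99,"V"),(101,"T"),(103,"C"),
    (113,"L"),(114,"N"),(115,"D"),(128,"Q"),(129,"E"),(131,"M"),
    (137,"H"),(147,"F"),(156,"R"),(163,"Y"),(186,"W")]

def ConstructSpectrumGraph (spectrum : List Int) : PySem.Dict Int (List (Int × String)) :=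
  let s := PySem.List.sorted (0 :: spectrum) (fun x => x)
  (PySem.List.pyRange 0 s.length).foldl (fun g i =>
    (PySem.List.pyRange (i + 1) s.length).foldl (fun g j =>
      match PySem.List.pyGet? s i, PySem.List.pyGet? s j with
      | some u, some v =>
        match pvMassTable.get? (v - u) with
        | some aa => g.modify u [] (fun es => es ++ [(v, aa)])
        | none => g
      | _, _ => g) g) PySem.Dict.empty

-- Python's DFS recursion, with a fuel bound as a totality guard (every edge strictly
-- increases the node value inside the finite node set, so the Python recursion depth
-- is at most spectrum.length + 2 and the guard is never hit on the ports' shared fuel).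
def DFSa (graph : PySem.Dict Int (List (Int × String))) (target : Int) :
    Nat → Int → List Int → List String → List String → List String
  | 0, _, _, _, allPaths => allPaths
  | fuel + 1, current, path, peptide, allPaths =>
    if current = target then allPaths ++ [PySem.Str.join "" peptide]
    else
      match graph.get? current with
      | none => allPaths
      | some edges =>
        edges.foldl (fun ap e =>
          DFSa graph target fuel e.1 (path ++ [e.1]) (peptide ++ [e.2]) ap) allPaths

def DecodeIdealSpectrum (spectrum : List Int) : Option String :=
  match PySem.List.max? spectrum (fun x => x) with
  | none => none  -- Python: max([]) raises ValueError; excluded by Pre_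
  | some e =>
    let graph := ConstructSpectrumGraph spectrum
    (DFSa graph e (spectrum.length + 2) 0 [] [] []).head?

-- ===== PORT B =====
def DFSb (nodes : PySem.Set Int) (endv : Int) : Nat → Int → Option String
  | 0, _ => none
  | fuel + 1, current =>
    if current = endv then some ""
    else
      List.findSome? (fun p =>
        if (current + p.1) ∈ nodes then
          (DFSb nodes endv fuel (current + p.1)).map (fun rest => p.2 ++ rest)
        else none) pvMassTable.items

def DecodeIdealSpectrum_alt (spectrum : List Int) : Option String :=
  match PySem.List.max? spectrum (fun x => x) with
  | none => none  -- max(spectrum) raises on the empty list; excluded by Pre_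
  | some e => DFSb ((PySem.Set.ofList spectrum).add 0) e (spectrum.length + 2) 0

-- ===== PRECONDITION & SPEC =====
-- Pre_ excludes only the empty list, on which Python A raises ValueError (max of empty).
def Pre_DecodeIdealSpectrum (spectrum : List Int) : Prop := spectrum ≠ []
instance (spectrum : List Int) : Decidable (Pre_DecodeIdealSpectrum spectrum) := by
  unfold Pre_DecodeIdealSpectrum; infer_instance
def pvWitness_DecodeIdealSpectrum : List Int := [57]

def Spec_DecodeIdealSpectrum (spectrum : List Int) (out : Option String) : Prop := out = DecodeIdealSpectrum_alt spectrum
instance (spectrum : List Int) (out : Option String) : Decidable (Spec_DecodeIdealSpectrum spectrum out) := by unfold Spec_DecodeIdealSpectrum; infer_instance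

-- ===== CLAIM (what is proved, stated in full; the proofs are below) =====
def Claim_equal_DecodeIdealSpectrum : Prop := ∀ (spectrum : List Int), Dom_DecodeIdealSpectrum spectrum → Pre_DecodeIdealSpectrum spectrum → Spec_DecodeIdealSpectrum spectrum (DecodeIdealSpectrum spectrum)

-- ===== LEMMAS AND PROOFS =====

theorem pvHead_flatMap {α β : Type} (g : α → List β) (l : List α) :
    (l.flatMap g).head? = l.findSome? (fun x => (g x).head?) := by
  induction l with
  | nil => rfl
  | cons a t ih =>
    simp only [List.flatMap_cons, List.findSome?_cons, List.head?_append]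
    cases (g a).head? <;> simp [ih]

theorem pvFindSome_map {α β γ : Type} (F : α → Option β) (h : β → γ) (l : List α) :
    l.findSome? (fun x => (F x).map h) = (l.findSome? F).map h := by
  induction l with
  | nil => rfl
  | cons a t ih =>
    simp only [List.findSome?_cons]
    cases F a <;> simp [ih]

theorem pvFindSome_filterMap {α β γ : Type} (h : α → Option β) (F : β → Option γ) (l : List α) :
    (l.filterMap h).findSome? F = l.findSome? (fun x => (h x).bind F) := by
  induction l with
  | nil => rfl
  | cons a t ih =>
    cases ha : h a with
    | none => simp [ha, ih]
    | some b =>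
      simp only [List.filterMap_cons, ha, List.findSome?_cons, Option.bind_some]
      cases F b <;> simp [ih]

theorem pvFindSome_filter_ne {α β : Type} [DecidableEq α] (F : α → Option β) (x : α)
    (hx : F x = none) (l : List α) :
    l.findSome? F = (l.filter (· ≠ x)).findSome? F := by
  induction l with
  | nil => rfl
  | cons a t ih =>
    by_cases hax : a = x
    · subst hax; simp [hx, ih]
    · simp [hax, List.findSome?_cons]
      cases F a <;> simp [ih]

theorem pvFindSome_sorted {α β : Type} [DecidableEq α] (key : α → Int) :
    ∀ (n : Nat) (l₁ l₂ : List α) (F : α → Option β), l₁.length ≤ n →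
    l₁.Pairwise (fun a b => key a ≤ key b) →
    l₂.Pairwise (fun a b => key a < key b) →
    (∀ x, x ∈ l₁ ↔ x ∈ l₂) →
    (∀ a b, a ∈ l₁ → b ∈ l₁ → key a = key b → a = b) →
    l₁.findSome? F = l₂.findSome? F := by
  intro n
  induction n with
  | zero =>
    intro l₁ l₂ F hlen _ _ hmem _
    have h1 : l₁ = [] := List.length_eq_zero_iff.mp (Nat.le_zero.mp hlen)
    subst h1
    have h2 : l₂ = [] := by
      cases l₂ with
      | nil => rfl
      | cons b t => exact absurd ((hmem b).mpr (List.mem_cons_self)) (List.not_mem_nil)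
    simp [h2]
  | succ n ih =>
    intro l₁ l₂ F hlen hp1 hp2 hmem hdet
    cases l₁ with
    | nil =>
      have h2 : l₂ = [] := by
        cases l₂ with
        | nil => rfl
        | cons b t => exact absurd ((hmem b).mpr (List.mem_cons_self)) (List.not_mem_nil)
      simp [h2]
    | cons x t₁ =>
      cases l₂ with
      | nil => exact absurd ((hmem x).mp (List.mem_cons_self)) (List.not_mem_nil)
      | cons y t₂ =>
        -- x = y
        have hxy : x = y := by
          have hx2 : x ∈ y :: t₂ := (hmem x).mp List.mem_cons_self
          have hy1 : y ∈ x :: t₁ := (hmem y).mpr List.mem_cons_self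
          have h1 : key x ≤ key y := by
            rcases List.mem_cons.mp hy1 with h | h
            · exact le_of_eq (by rw [h])
            · exact (List.pairwise_cons.mp hp1).1 y h
          have h2 : key y ≤ key x := by
            rcases List.mem_cons.mp hx2 with h | h
            · exact le_of_eq (by rw [h])
            · exact le_of_lt ((List.pairwise_cons.mp hp2).1 x h)
          exact hdet x y List.mem_cons_self hy1 (le_antisymm h1 h2)
        subst hxy
        simp only [List.findSome?_cons]
        cases hFx : F x with
        | some b => rfl
        | none =>
          -- reduce t₁ to t₁.filter (· ≠ x) and use IH against t₂
          rw [pvFindSome_filter_ne F x hFx t₁]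
          have hxnot2 : x ∉ t₂ := by
            intro hmem2
            exact absurd ((List.pairwise_cons.mp hp2).1 x hmem2) (lt_irrefl _)
          apply ih
          · have := List.length_filter_le (fun a => a ≠ x) t₁
            have hl : t₁.length ≤ n := Nat.le_of_succ_le_succ hlen
            omega
          · exact List.Pairwise.filter _ (List.pairwise_cons.mp hp1).2
          · exact (List.pairwise_cons.mp hp2).2
          · intro z
            constructor
            · intro hz
              have hz' := List.mem_of_mem_filter hz
              have hzx : z ≠ x := by
                have := List.of_mem_filter hz
                simpa using this
              have : z ∈ x :: t₁ := List.mem_cons_of_mem _ hz'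
              rcases List.mem_cons.mp ((hmem z).mp this) with h | h
              · exact absurd h hzx
              · exact h
            · intro hz
              have hzx : z ≠ x := fun h => hxnot2 (h ▸ hz)
              have : z ∈ x :: t₁ := (hmem z).mpr (List.mem_cons_of_mem _ hz)
              rcases List.mem_cons.mp this with h | h
              · exact absurd h hzx
              · exact List.mem_filter.mpr ⟨h, by simpa using hzx⟩
          · intro a b ha hb
            exact hdet a b (List.mem_cons_of_mem _ (List.mem_of_mem_filter ha))
              (List.mem_cons_of_mem _ (List.mem_of_mem_filter hb))

theorem pvFindSome_flatMap_const {α β γ : Type} (h : α → List β) (C : List β) (l : List α)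
    (F : β → Option γ)
    (hall : ∀ i ∈ l, h i = [] ∨ h i = C) (hex : ∃ i ∈ l, h i = C) :
    (l.flatMap h).findSome? F = C.findSome? F := by
  by_cases hCnil : C = []
  · subst hCnil
    have hnone : ∀ x ∈ l.flatMap h, F x = none := by
      intro x hx
      rcases List.mem_flatMap.mp hx with ⟨i, hi, hxi⟩
      rcases hall i hi with h0 | h0 <;> rw [h0] at hxi <;> exact absurd hxi List.not_mem_nil
    simp [List.findSome?_eq_none_iff.mpr hnone]
  · revert hall hex
    induction l with
    | nil =>
      intro _ hex
      rcases hex with ⟨i, hi, _⟩; exact absurd hi List.not_mem_nil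
    | cons a t ih =>
      intro hall hex
      rcases hall a List.mem_cons_self with ha | ha
      · have hex' : ∃ i ∈ t, h i = C := by
          rcases hex with ⟨i, hi, hC⟩
          rcases List.mem_cons.mp hi with rfl | hi'
          · exact absurd (ha ▸ hC).symm hCnil
          · exact ⟨i, hi', hC⟩
        simp only [List.flatMap_cons, ha, List.nil_append]
        exact ih (fun i hi => hall i (List.mem_cons_of_mem _ hi)) hex'
      · rw [List.flatMap_cons, ha, List.findSome?_append]
        cases hC : C.findSome? F with
        | some b => simp
        | none =>
          rw [Option.none_or]
          have hnone : ∀ x ∈ t.flatMap h, F x = none := by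
            intro x hx
            rcases List.mem_flatMap.mp hx with ⟨i, hi, hxi⟩
            rcases hall i (List.mem_cons_of_mem _ hi) with h0 | h0
            · rw [h0] at hxi; exact absurd hxi List.not_mem_nil
            · rw [h0] at hxi
              exact List.findSome?_eq_none_iff.mp hC x hxi
          exact List.findSome?_eq_none_iff.mpr hnone

theorem pvFindSome_congr {α β : Type} (f g : α → Option β) (l : List α)
    (h : ∀ x ∈ l, f x = g x) : l.findSome? f = l.findSome? g := by
  induction l with
  | nil => rfl
  | cons a t ih =>
    simp only [List.findSome?_cons, h a List.mem_cons_self]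
    cases g a with
    | some b => rfl
    | none => exact ih (fun x hx => h x (List.mem_cons_of_mem _ hx))

theorem pvIntercalate_nil : ∀ (L : List (List Char)), List.intercalate [] L = L.flatten := by
  intro L
  induction L with
  | nil => rfl
  | cons a t ih =>
    cases t with
    | nil => simp [List.intercalate]
    | cons b u =>
      simp [List.intercalate] at ih ⊢
      simpa using ih

theorem pvJoin_nil : PySem.Str.join "" [] = "" := by simp [PySem.Str.join]

theorem pvJoin_append (l : List String) (a : String) :
    PySem.Str.join "" (l ++ [a]) = PySem.Str.join "" l ++ a := by
  simp only [PySem.Str.join, PySem.Chars.join, List.map_append, List.map_cons, List.map_nil]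
  rw [show ("".toList) = ([] : List Char) from rfl, pvIntercalate_nil, pvIntercalate_nil, List.flatten_append]
  simp [String.ofList_append, String.ofList_toList]

theorem pvMass_mem_iff (m : Int) (aa : String) :
    pvMassTable.get? m = some aa ↔ (m, aa) ∈ pvMassTable.items :=
  PySem.Dict.get?_eq_some_iff_mem_items _ _ _ (PySem.Dict.nodup_keys_ofList _)

theorem pvMass_items_pos : ∀ p ∈ pvMassTable.items, (0:Int) < p.1 := by decide

theorem pvMass_pos (d : Int) (aa : String) (h : pvMassTable.get? d = some aa) : 0 < d :=
  pvMass_items_pos _ ((pvMass_mem_iff d aa).mp h)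

theorem pvMass_items_sorted : pvMassTable.items.Pairwise (fun p q => p.1 < q.1) := by decide

def pvS (spectrum : List Int) : List Int := PySem.List.sorted (0 :: spectrum) (fun x => x)

def pvNodes (spectrum : List Int) : PySem.Set Int := (PySem.Set.ofList spectrum).add 0

-- the candidate edge produced by index j for source node u

def pvF (s : List Int) (u : Int) (j : Int) : Option (Int × String) :=
  match PySem.List.pyGet? s j with
  | some v => (pvMassTable.get? (v - u)).map (fun aa => (v, aa))
  | none => none

-- edges out of u read off the tail of the sorted node list starting at index a

def pvBlock (s : List Int) (u a : Int) : List (Int × String) :=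
  (PySem.List.pyRange a s.length).filterMap (pvF s u)

-- the (key, edge) actions performed by A's nested loop, in order

def pvActs (s : List Int) : List (Int × Int × String) :=
  (PySem.List.pyRange 0 s.length).flatMap (fun i =>
    (PySem.List.pyRange (i + 1) s.length).filterMap (fun j =>
      match PySem.List.pyGet? s i, PySem.List.pyGet? s j with
      | some u, some v => (pvMassTable.get? (v - u)).map (fun aa => (u, (v, aa)))
      | _, _ => none))

-- B's candidate edges out of u, in mass order

def pvBL (spectrum : List Int) (u : Int) : List (Int × String) :=
  pvMassTable.items.filterMap (fun p =>
    if (u + p.1) ∈ pvNodes spectrum then some (u + p.1, p.2) else none)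

theorem pvS_pairwise (spectrum : List Int) : (pvS spectrum).Pairwise (· ≤ ·) := by
  exact PySem.List.sorted_pairwise (0 :: spectrum) (fun x => x)

theorem pvMem_S_iff (spectrum : List Int) (v : Int) :
    v ∈ pvS spectrum ↔ v = 0 ∨ v ∈ spectrum := by
  unfold pvS
  rw [PySem.List.mem_sorted]
  simp

theorem pvMem_nodes_iff (spectrum : List Int) (v : Int) :
    v ∈ pvNodes spectrum ↔ v = 0 ∨ v ∈ spectrum := by
  unfold pvNodes
  rw [PySem.Set.mem_add, PySem.Set.mem_ofList]
  tauto

theorem pvGet_elem (s : List Int) (j : Int) (h0 : 0 ≤ j) (v : Int)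
    (h : PySem.List.pyGet? s j = some v) :
    ∃ k : Nat, j = (k : Int) ∧ ∃ hk : k < s.length, s[k] = v := by
  refine ⟨j.toNat, by omega, ?_⟩
  have hj : j = ((j.toNat : Nat) : Int) := by omega
  rw [hj, PySem.List.pyGet?_natCast] at h
  exact List.getElem?_eq_some_iff.mp h

theorem pvS_mono (spectrum : List Int) (k₁ k₂ : Nat) (hk₂ : k₂ < (pvS spectrum).length)
    (hle : k₁ ≤ k₂) : (pvS spectrum)[k₁]'(by omega) ≤ (pvS spectrum)[k₂] := by
  rcases Nat.lt_or_ge k₁ k₂ with h | h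
  · exact List.pairwise_iff_getElem.mp (pvS_pairwise spectrum) k₁ k₂ (by omega) hk₂ h
  · have : k₁ = k₂ := by omega
    subst this; exact le_refl _

theorem pvGraph_eq (spectrum : List Int) :
    ConstructSpectrumGraph spectrum =
      (pvActs (pvS spectrum)).foldl (fun d p => d.modify p.1 [] (fun es => es ++ [p.2]))
        PySem.Dict.empty := by
  unfold ConstructSpectrumGraph pvActs pvS
  rw [List.foldl_flatMap]
  apply PySem.List.foldl_congr_mem
  intro d i _
  rw [List.foldl_filterMap]
  apply PySem.List.foldl_congr_mem
  intro d' j _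
  cases hi : PySem.List.pyGet? (PySem.List.sorted (0 :: spectrum) (fun x => x)) i with
  | none => rfl
  | some u =>
    cases hj : PySem.List.pyGet? (PySem.List.sorted (0 :: spectrum) (fun x => x)) j with
    | none => rfl
    | some v =>
      dsimp only
      cases h : pvMassTable.get? (v - u) <;> simp

theorem pvAdj_eq (spectrum : List Int) (u : Int) :
    (ConstructSpectrumGraph spectrum).getD u [] =
      ((pvActs (pvS spectrum)).filter (fun p => p.1 == u)).map (fun p => p.2) := by
  rw [pvGraph_eq, PySem.Dict.getD_foldl_modify_append]
  simp [PySem.Dict.getD_empty]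

theorem pvFilter_acts (spectrum : List Int) (u : Int) :
    ((pvActs (pvS spectrum)).filter (fun p => p.1 == u)).map (fun p => p.2) =
      (PySem.List.pyRange 0 (pvS spectrum).length).flatMap (fun i =>
        if PySem.List.pyGet? (pvS spectrum) i = some u then pvBlock (pvS spectrum) u (i + 1)
        else []) := by
  unfold pvActs
  rw [List.filter_flatMap, List.map_flatMap]
  congr 1
  funext i
  cases hi : PySem.List.pyGet? (pvS spectrum) i with
  | none =>
    rw [if_neg (by simp)]
    rw [List.filterMap_eq_nil_iff.mpr (by intro j _; rfl)]
    simp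
  | some u' =>
    by_cases hu : u' = u
    · subst hu
      rw [if_pos rfl]
      unfold pvBlock pvF
      rw [List.filter_filterMap, List.map_filterMap]
      apply List.filterMap_congr
      intro j _
      cases hj : PySem.List.pyGet? (pvS spectrum) j with
      | none => rfl
      | some v =>
        cases h : pvMassTable.get? (v - u') <;> simp [h]
    · rw [if_neg (by simp; exact fun h => hu h)]
      rw [List.filter_filterMap, List.map_filterMap]
      rw [List.filterMap_eq_nil_iff.mpr ?_]
      intro j _
      cases hj : PySem.List.pyGet? (pvS spectrum) j with
      | none => rfl
      | some v =>
        cases h : pvMassTable.get? (v - u') <;> simp [h, Option.filter]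
        intro h'
        exact absurd h' hu



-- index ↔ element bridge for pvBlock at a = 0

theorem pvMem_block_iff (spectrum : List Int) (u : Int) (v : Int) (aa : String) :
    (v, aa) ∈ pvBlock (pvS spectrum) u 0 ↔
      v ∈ pvS spectrum ∧ pvMassTable.get? (v - u) = some aa := by
  unfold pvBlock pvF
  rw [List.mem_filterMap]
  constructor
  · rintro ⟨j, hj, hsome⟩
    rcases PySem.List.mem_pyRange_one.mp hj with ⟨h0, hlt⟩
    cases hg : PySem.List.pyGet? (pvS spectrum) j with
    | none => rw [hg] at hsome; exact absurd hsome (by simp)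
    | some w =>
      rw [hg] at hsome
      simp only [Option.map_eq_some_iff] at hsome
      rcases hsome with ⟨aa', hget, heq⟩
      have hw : w = v := by cases heq; rfl
      have haa : aa' = aa := by cases heq; rfl
      subst hw; subst haa
      refine ⟨?_, hget⟩
      -- v ∈ pvS from pyGet?
      have hj' : j = ((j.toNat : Nat) : Int) := by omega
      rw [hj', PySem.List.pyGet?_natCast] at hg
      exact List.mem_of_getElem? hg
  · rintro ⟨hv, hget⟩
    rcases List.getElem?_of_mem hv with ⟨n, hn⟩
    have hnlt : n < (pvS spectrum).length := by
      by_contra h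
      rw [List.getElem?_eq_none_iff.mpr (by omega)] at hn
      exact absurd hn (by simp)
    refine ⟨(n : Int), PySem.List.mem_pyRange_one.mpr ⟨by omega, by exact_mod_cast hnlt⟩, ?_⟩
    rw [PySem.List.pyGet?_natCast, hn]
    simp [hget]

theorem pvMem_BL_iff (spectrum : List Int) (u : Int) (v : Int) (aa : String) :
    (v, aa) ∈ pvBL spectrum u ↔
      v ∈ pvNodes spectrum ∧ pvMassTable.get? (v - u) = some aa := by
  unfold pvBL
  rw [List.mem_filterMap]
  constructor
  · rintro ⟨p, hp, hsome⟩
    by_cases hmem : (u + p.1) ∈ pvNodes spectrum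
    · rw [if_pos hmem] at hsome
      have h1 : u + p.1 = v ∧ p.2 = aa := by
        constructor <;> cases hsome <;> rfl
      rcases h1 with ⟨hv1, ha1⟩
      refine ⟨hv1 ▸ hmem, ?_⟩
      rw [pvMass_mem_iff]
      have hp' : p = (v - u, aa) := by
        rcases p with ⟨p1, p2⟩
        simp only [Prod.mk.injEq]
        simp only at hv1 ha1
        exact ⟨by omega, ha1⟩
      exact hp' ▸ hp
    · rw [if_neg hmem] at hsome
      exact absurd hsome (by simp)
  · rintro ⟨hv, hget⟩
    refine ⟨(v - u, aa), (pvMass_mem_iff _ _).mp hget, ?_⟩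
    rw [if_pos (by simpa using hv)]
    simp

theorem pvBlock_pairwise (spectrum : List Int) (u : Int) (a : Int) (ha : 0 ≤ a) :
    (pvBlock (pvS spectrum) u a).Pairwise (fun p q => p.1 ≤ q.1) := by
  unfold pvBlock
  rw [List.pairwise_filterMap]
  apply List.Pairwise.imp_of_mem (R := (· < ·)) ?_ (PySem.List.pairwise_lt_pyRange_one a _)
  intro j₁ j₂ hm₁ hm₂ hlt b hb b' hb'
  unfold pvF at hb hb'
  have h0₁ : 0 ≤ j₁ := le_trans ha (PySem.List.mem_pyRange_one.mp hm₁).1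
  have h0₂ : 0 ≤ j₂ := le_trans ha (PySem.List.mem_pyRange_one.mp hm₂).1
  cases hg1 : PySem.List.pyGet? (pvS spectrum) j₁ with
  | none => rw [hg1] at hb; exact absurd hb (by simp)
  | some v₁ =>
    cases hg2 : PySem.List.pyGet? (pvS spectrum) j₂ with
    | none => rw [hg2] at hb'; exact absurd hb' (by simp)
    | some v₂ =>
      rw [hg1] at hb; rw [hg2] at hb'
      simp only [Option.map_eq_some_iff] at hb hb'
      rcases hb with ⟨aa₁, _, hb⟩
      rcases hb' with ⟨aa₂, _, hb'⟩
      have hb1 : b.1 = v₁ := by cases hb; rfl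
      have hb2 : b'.1 = v₂ := by cases hb'; rfl
      rw [hb1, hb2]
      rcases pvGet_elem _ j₁ h0₁ _ hg1 with ⟨k₁, hjk₁, hk₁, he₁⟩
      rcases pvGet_elem _ j₂ h0₂ _ hg2 with ⟨k₂, hjk₂, hk₂, he₂⟩
      rw [← he₁, ← he₂]
      exact pvS_mono spectrum k₁ k₂ hk₂ (by omega)

theorem pvBL_pairwise (spectrum : List Int) (u : Int) :
    (pvBL spectrum u).Pairwise (fun p q => p.1 < q.1) := by
  unfold pvBL
  rw [List.pairwise_filterMap]
  apply List.Pairwise.imp ?_ pvMass_items_sorted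
  intro p q hlt b hb b' hb'
  by_cases h1 : (u + p.1) ∈ pvNodes spectrum
  · rw [if_pos h1] at hb
    by_cases h2 : (u + q.1) ∈ pvNodes spectrum
    · rw [if_pos h2] at hb'
      have e1 : b.1 = u + p.1 := by cases hb; rfl
      have e2 : b'.1 = u + q.1 := by cases hb'; rfl
      rw [e1, e2]; omega
    · rw [if_neg h2] at hb'; exact absurd hb' (by simp)
  · rw [if_neg h1] at hb; exact absurd hb (by simp)

theorem pvBlock_shift (spectrum : List Int) (u i : Int)
    (h0 : 0 ≤ i) (hi : i < ((pvS spectrum).length : Int))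
    (hu : PySem.List.pyGet? (pvS spectrum) i = some u) :
    pvBlock (pvS spectrum) u (i + 1) = pvBlock (pvS spectrum) u 0 := by
  have hsplit := PySem.List.pyRange_one_append 0 (i + 1) ((pvS spectrum).length : Int)
    (by omega) (by omega)
  unfold pvBlock
  rw [hsplit, List.filterMap_append]
  have hpre : (PySem.List.pyRange 0 (i + 1)).filterMap (pvF (pvS spectrum) u) = [] := by
    rw [List.filterMap_eq_nil_iff]
    intro j hj
    rcases PySem.List.mem_pyRange_one.mp hj with ⟨hj0, hjlt⟩
    unfold pvF
    cases hg : PySem.List.pyGet? (pvS spectrum) j with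
    | none => rfl
    | some v =>
      rcases pvGet_elem _ j hj0 _ hg with ⟨k, hjk, hk, he⟩
      rcases pvGet_elem _ i h0 _ hu with ⟨ki, hiki, hki, hei⟩
      have hvu : v ≤ u := by
        rw [← he, ← hei]
        exact pvS_mono spectrum k ki hki (by omega)
      cases hq : pvMassTable.get? (v - u) with
      | none => simp [hq]
      | some aa =>
        have := pvMass_pos _ _ hq
        omega
  rw [hpre, List.nil_append]

theorem pvDFSa_acc (G : PySem.Dict Int (List (Int × String))) (e : Int) :
    ∀ (fuel : Nat) (current : Int) (path : List Int) (pep acc : List String),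
      DFSa G e fuel current path pep acc =
        acc ++ DFSa G e fuel current path pep [] := by
  intro fuel
  induction fuel with
  | zero => intro current path pep acc; simp [DFSa]
  | succ n ih =>
    intro current path pep acc
    by_cases hc : current = e
    · simp [DFSa, hc]
    · simp only [DFSa, if_neg hc]
      cases hg : G.get? current with
      | none => simp
      | some edges =>
        dsimp only
        have hcong := PySem.List.foldl_congr_mem
          (l := edges) (init := acc)
          (f := fun ap (p : Int × String) => DFSa G e n p.1 (path ++ [p.1]) (pep ++ [p.2]) ap)
          (g := fun ap (p : Int × String) => ap ++ DFSa G e n p.1 (path ++ [p.1]) (pep ++ [p.2]) [])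
          (fun a p _ => ih p.1 _ _ a)
        have hcong0 := PySem.List.foldl_congr_mem
          (l := edges) (init := ([] : List String))
          (f := fun ap (p : Int × String) => DFSa G e n p.1 (path ++ [p.1]) (pep ++ [p.2]) ap)
          (g := fun ap (p : Int × String) => ap ++ DFSa G e n p.1 (path ++ [p.1]) (pep ++ [p.2]) [])
          (fun a p _ => ih p.1 _ _ a)
        rw [hcong, hcong0, PySem.List.foldl_append_eq_flatMap, PySem.List.foldl_append_eq_flatMap]
        simp

theorem pvAdj_findSome (spectrum : List Int) (u : Int) (hu : u ∈ pvS spectrum)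
    {β : Type} (F : Int × String → Option β) :
    ((ConstructSpectrumGraph spectrum).getD u []).findSome? F =
      (pvBL spectrum u).findSome? F := by
  rw [pvAdj_eq, pvFilter_acts]
  -- collapse the flatMap of equal blocks
  rw [pvFindSome_flatMap_const (C := pvBlock (pvS spectrum) u 0)]
  · -- sorted-with-duplicates vs strictly-sorted same-element lists
    apply pvFindSome_sorted (fun p => p.1) (pvBlock (pvS spectrum) u 0).length _ _ F le_rfl
    · exact pvBlock_pairwise spectrum u 0 le_rfl
    · exact pvBL_pairwise spectrum u
    · rintro ⟨v, aa⟩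
      rw [pvMem_block_iff, pvMem_BL_iff, pvMem_S_iff, pvMem_nodes_iff]
    · rintro ⟨v, aa⟩ ⟨v', aa'⟩ ha hb hk
      simp only at hk
      subst hk
      rcases (pvMem_block_iff spectrum u v aa).mp ha with ⟨_, h1⟩
      rcases (pvMem_block_iff spectrum u v aa').mp hb with ⟨_, h2⟩
      rw [h1] at h2
      cases h2
      rfl
  · -- every piece is [] or the canonical block
    intro i hi
    rcases PySem.List.mem_pyRange_one.mp hi with ⟨h0, hlt⟩
    by_cases hg : PySem.List.pyGet? (pvS spectrum) i = some u
    · right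
      rw [if_pos hg]
      exact pvBlock_shift spectrum u i h0 (by exact_mod_cast hlt) hg
    · left
      rw [if_neg hg]
  · -- an occurrence of u exists
    rcases List.getElem?_of_mem hu with ⟨n, hn⟩
    have hnlt : n < (pvS spectrum).length := by
      by_contra h
      rw [List.getElem?_eq_none_iff.mpr (by omega)] at hn
      exact absurd hn (by simp)
    refine ⟨(n : Int), PySem.List.mem_pyRange_one.mpr ⟨by omega, by exact_mod_cast hnlt⟩, ?_⟩
    have hg : PySem.List.pyGet? (pvS spectrum) (n : Int) = some u := by
      rw [PySem.List.pyGet?_natCast, hn]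
    rw [if_pos hg]
    exact pvBlock_shift spectrum u (n : Int) (by omega) (by exact_mod_cast hnlt) hg

theorem pvMem_adj (spectrum : List Int) (u : Int) (p : Int × String)
    (hp : p ∈ (ConstructSpectrumGraph spectrum).getD u []) : p.1 ∈ pvS spectrum := by
  rw [pvAdj_eq, pvFilter_acts] at hp
  rcases List.mem_flatMap.mp hp with ⟨i, hi, hpi⟩
  rcases PySem.List.mem_pyRange_one.mp hi with ⟨h0, hlt⟩
  by_cases hg : PySem.List.pyGet? (pvS spectrum) i = some u
  · rw [if_pos hg, pvBlock_shift spectrum u i h0 (by exact_mod_cast hlt) hg] at hpi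
    rcases p with ⟨v, aa⟩
    exact ((pvMem_block_iff spectrum u v aa).mp hpi).1
  · rw [if_neg hg] at hpi
    exact absurd hpi List.not_mem_nil

theorem pvMain (spectrum : List Int) (e : Int) :
    ∀ (fuel : Nat) (current : Int) (path : List Int) (pep : List String),
      current ∈ pvS spectrum →
      (DFSa (ConstructSpectrumGraph spectrum) e fuel current path pep []).head? =
        (DFSb (pvNodes spectrum) e fuel current).map
          (fun r => PySem.Str.join "" pep ++ r) := by
  intro fuel
  induction fuel with
  | zero => intro current path pep _; simp [DFSa, DFSb]
  | succ n ih =>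
    intro current path pep hcur
    by_cases hc : current = e
    · subst hc
      simp only [DFSa, DFSb]
      simp
    · simp only [DFSa, DFSb, if_neg hc]
      have hR :
          Option.map (fun r => PySem.Str.join "" pep ++ r)
            (List.findSome? (fun p =>
              if current + p.1 ∈ pvNodes spectrum then
                Option.map (fun rest => p.2 ++ rest) (DFSb (pvNodes spectrum) e n (current + p.1))
              else none) pvMassTable.items)
          = List.findSome?
              (fun p => (DFSa (ConstructSpectrumGraph spectrum) e n p.1
                (path ++ [p.1]) (pep ++ [p.2]) []).head?)
              ((ConstructSpectrumGraph spectrum).getD current []) := by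
        calc
          Option.map (fun r => PySem.Str.join "" pep ++ r)
            (List.findSome? (fun p =>
              if current + p.1 ∈ pvNodes spectrum then
                Option.map (fun rest => p.2 ++ rest) (DFSb (pvNodes spectrum) e n (current + p.1))
              else none) pvMassTable.items)
              = Option.map (fun r => PySem.Str.join "" pep ++ r)
                  ((pvBL spectrum current).findSome?
                    (fun p => (DFSb (pvNodes spectrum) e n p.1).map (fun r => p.2 ++ r))) := by
                congr 1
                unfold pvBL
                rw [pvFindSome_filterMap]
                apply pvFindSome_congr
                intro p _
                by_cases hmem : (current + p.1) ∈ pvNodes spectrum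
                · rw [if_pos hmem, if_pos hmem]
                  rfl
                · rw [if_neg hmem, if_neg hmem]
                  rfl
          _ = Option.map (fun r => PySem.Str.join "" pep ++ r)
                (((ConstructSpectrumGraph spectrum).getD current []).findSome?
                  (fun p => (DFSb (pvNodes spectrum) e n p.1).map (fun r => p.2 ++ r))) := by
                rw [← pvAdj_findSome spectrum current hcur]
          _ = ((ConstructSpectrumGraph spectrum).getD current []).findSome?
                (fun p => ((DFSb (pvNodes spectrum) e n p.1).map (fun r => p.2 ++ r)).map
                  (fun r => PySem.Str.join "" pep ++ r)) := by
                rw [pvFindSome_map]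
          _ = List.findSome?
                (fun p => (DFSa (ConstructSpectrumGraph spectrum) e n p.1
                  (path ++ [p.1]) (pep ++ [p.2]) []).head?)
                ((ConstructSpectrumGraph spectrum).getD current []) := by
                apply pvFindSome_congr
                intro p hp
                rw [ih p.1 (path ++ [p.1]) (pep ++ [p.2]) (pvMem_adj spectrum current p hp)]
                rw [Option.map_map]
                congr 1
                funext r
                simp only [Function.comp]
                rw [pvJoin_append]
                exact String.append_assoc.symm
      rw [hR, PySem.Dict.getD_eq_get?_getD]
      cases hg : (ConstructSpectrumGraph spectrum).get? current with
      | none => rfl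
      | some edges =>
        simp only [Option.getD_some]
        have hcong := PySem.List.foldl_congr_mem
          (l := edges) (init := ([] : List String))
          (f := fun ap (p : Int × String) =>
            DFSa (ConstructSpectrumGraph spectrum) e n p.1 (path ++ [p.1]) (pep ++ [p.2]) ap)
          (g := fun ap (p : Int × String) =>
            ap ++ DFSa (ConstructSpectrumGraph spectrum) e n p.1 (path ++ [p.1]) (pep ++ [p.2]) [])
          (fun a p _ => pvDFSa_acc (ConstructSpectrumGraph spectrum) e n p.1 (path ++ [p.1]) (pep ++ [p.2]) a)
        rw [hcong, PySem.List.foldl_append_eq_flatMap, List.nil_append]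
        exact pvHead_flatMap _ edges

-- ===== VERDICT (by name: the statement is the Claim_ definition above) =====
theorem DecodeIdealSpectrum_spec : Claim_equal_DecodeIdealSpectrum := by
  intro spectrum _ _
  unfold Spec_DecodeIdealSpectrum DecodeIdealSpectrum DecodeIdealSpectrum_alt
  cases h : PySem.List.max? spectrum (fun x => x) with
  | none => rfl
  | some e =>
    have h0 : (0 : Int) ∈ pvS spectrum := by
      rw [pvMem_S_iff]; exact Or.inl rfl
    have hm := pvMain spectrum e (spectrum.length + 2) 0 [] [] h0
    simp only [] at hm ⊢
    rw [hm, pvJoin_nil]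
    unfold pvNodes
    cases DFSb ((PySem.Set.ofList spectrum).add 0) e (spectrum.length + 2) 0 with
    | none => rfl
    | some r => simp
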